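-- pv_equiv track=rewrite | github.com/tranhocphuc/Bachelor-Engineering-Thesis | utils/peaks_util.py | get_echo_peaks
-- ===== SOURCE A (Python) =====
-- def get_echo_peaks(peaks, window_size=1024, echo_left_size=256):
-- # Anuj's code:
-- #     prev_value = peaks[0] #old
-- #     echos = []
-- #     if peaks[0] > echo_left_size:
-- #         echos.append(peaks[0])
-- #     # if peaks[-1] < echo_right_size
-- #     for i in peaks:
-- #         if len(echos):
-- #             if i - prev_value - echo_left_size > window_size:
-- #                 prev_value = i
-- #                 echos.append(i)
--
-- # #My modification:
--     echos = []
--     for peak in peaks: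
--         prev_value = peak
--         if prev_value > echo_left_size:
--             echos.append(prev_value)
--             break
--     for new_peak in peaks:
--         if len(echos):
--             if new_peak - prev_value > window_size:
--                 prev_value = new_peak
--                 echos.append(new_peak)
--     return echos
-- ===== SOURCE B (Python) =====
-- def get_echo_peaks(peaks, window_size=1024, echo_left_size=256):
--     # scan-then-filter decomposition:
--     # 1) collect qualifying peaks once; the first is the seed echo,
--     # 2) one scan computes, for every position, the running "previous selected
--     #    value" in force BEFORE that peak is considered,
--     # 3) the result is assembled declaratively by filtering peaks against that
--     #    precomputed prev-sequence.
--     firsts = [p for p in peaks if p > echo_left_size]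
--     if not firsts:
--         return []
--     seed = firsts[0]
--     prevs = []
--     prev = seed
--     for p in peaks:
--         prevs.append(prev)
--         if p - prev > window_size:
--             prev = p
--     return [seed] + [p for p, q in zip(peaks, prevs) if p - q > window_size]
-- ===== Notes on version B (the rewrite author's own statement) =====
-- stated objective: alternative
-- what changed: A's break-out search loop and len(echos)-gated append loop are replaced by a filter/scan/filter pipeline: one comprehension collects qualifying peaks (its head is the seed), one scan precomputes the running previous-selected-value in force before each position, and the result is assembled by filtering the zipped (peak, prev) pairs instead of appending inside a stateful loop.
import Mathlib
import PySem

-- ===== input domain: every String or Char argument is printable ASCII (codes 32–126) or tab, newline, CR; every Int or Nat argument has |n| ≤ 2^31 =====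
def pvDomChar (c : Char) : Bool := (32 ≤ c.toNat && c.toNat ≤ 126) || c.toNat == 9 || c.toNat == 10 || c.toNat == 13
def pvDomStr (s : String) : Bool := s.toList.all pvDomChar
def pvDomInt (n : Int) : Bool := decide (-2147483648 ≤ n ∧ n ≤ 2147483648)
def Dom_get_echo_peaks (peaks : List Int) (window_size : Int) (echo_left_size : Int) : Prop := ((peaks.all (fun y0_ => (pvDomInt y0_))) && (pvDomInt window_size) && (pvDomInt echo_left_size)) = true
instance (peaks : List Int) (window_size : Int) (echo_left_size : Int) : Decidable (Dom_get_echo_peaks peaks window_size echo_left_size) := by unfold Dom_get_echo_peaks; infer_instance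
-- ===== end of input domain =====

-- B replaces A's two imperative gated loops by a filter/scan/filter pipeline: collect the
-- qualifying peaks, precompute the running previous-selected-value sequence in one scan,
-- then assemble the result declaratively (objective: alternative); values proved equal on
-- all inputs.

-- ===== PORT A =====
-- A's first loop: prev_value := peak; if prev_value > echo_left_size, append it and break.
-- Returns the appended peak, or none if the loop ends without appending (then echos = []
-- and the second loop's `if len(echos)` gate never fires, so prev_value is never read).
def pvLoop1A : List Int → Int → Option Int
  | [], _ => none
  | peak :: rest, echo_left_size =>
      if peak > echo_left_size then some peak else pvLoop1A rest echo_left_size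

def get_echo_peaks (peaks : List Int) (window_size : Int) (echo_left_size : Int) : List Int :=
  match pvLoop1A peaks echo_left_size with
  | none => []   -- echos stays []; the len(echos) gate blocks every second-loop iteration
  | some f =>
      -- second loop over ALL of peaks with state (echos, prev_value), keeping the
      -- `if len(echos)` gate exactly as in the Python
      (peaks.foldl
        (fun (st : List Int × Int) new_peak =>
          if st.1.length ≠ 0 then
            if new_peak - st.2 > window_size then (st.1 ++ [new_peak], new_peak) else st
          else st)
        ([f], f)).1

-- ===== PORT B =====
def get_echo_peaks_alt (peaks : List Int) (window_size : Int) (echo_left_size : Int) : List Int :=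
  match peaks.filter (fun p => decide (p > echo_left_size)) with   -- the `firsts` comprehension
  | [] => []
  | seed :: _ =>
      -- the scan loop: appends the prev in force before each peak, then updates prev
      let prevs := (peaks.foldl
        (fun (st : List Int × Int) p =>
          (st.1 ++ [st.2], if p - st.2 > window_size then p else st.2))
        ([], seed)).1
      -- [seed] + the zip/filter comprehension
      seed :: (((peaks.zip prevs).filter (fun pq => decide (pq.1 - pq.2 > window_size))).map Prod.fst)

-- ===== PRECONDITION & SPEC =====
def Spec_get_echo_peaks (peaks : List Int) (window_size : Int) (echo_left_size : Int) (out : List Int) : Prop := out = get_echo_peaks_alt peaks window_size echo_left_size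
instance (peaks : List Int) (window_size : Int) (echo_left_size : Int) (out : List Int) : Decidable (Spec_get_echo_peaks peaks window_size echo_left_size out) := by unfold Spec_get_echo_peaks; infer_instance

-- ===== CLAIM (what is proved, stated in full; the proofs are below) =====
def Claim_equal_get_echo_peaks : Prop := ∀ (peaks : List Int) (window_size : Int) (echo_left_size : Int), Dom_get_echo_peaks peaks window_size echo_left_size → Spec_get_echo_peaks peaks window_size echo_left_size (get_echo_peaks peaks window_size echo_left_size)

-- ===== LEMMAS AND PROOFS =====

-- A's break-out first loop returns exactly the head of B's `firsts` filter
theorem pvLoop1A_eq_filter_head (peaks : List Int) (e : Int) :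
    pvLoop1A peaks e = (peaks.filter (fun p => decide (p > e))).head? := by
  induction peaks with
  | nil => rfl
  | cons p rest ih =>
      simp only [pvLoop1A, List.filter_cons]
      by_cases h : p > e <;> simp [h, ih]

-- the prev-sequence B's scan loop computes, as a structural recursion
def prevsOf (window_size : Int) : Int → List Int → List Int
  | _, [] => []
  | prev, p :: rest =>
      prev :: prevsOf window_size (if p - prev > window_size then p else prev) rest

-- B's append-accumulating scan equals prevsOf
theorem scan_eq_prevsOf (window_size : Int) (peaks : List Int) :
    ∀ (pre : List Int) (prev : Int),
    (peaks.foldl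
        (fun (st : List Int × Int) p =>
          (st.1 ++ [st.2], if p - st.2 > window_size then p else st.2))
        (pre, prev)).1 = pre ++ prevsOf window_size prev peaks := by
  induction peaks with
  | nil => intro pre prev; simp [prevsOf]
  | cons p rest ih =>
      intro pre prev
      simp only [List.foldl_cons, prevsOf]
      rw [ih]
      simp

-- A's gated second loop equals the zip/filter of B against the prev-sequence
theorem foldA_eq_zip_filter (window_size : Int) (peaks : List Int) :
    ∀ (acc : List Int) (prev : Int), acc ≠ [] →
    (peaks.foldl
        (fun (st : List Int × Int) new_peak =>
          if st.1.length ≠ 0 then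
            if new_peak - st.2 > window_size then (st.1 ++ [new_peak], new_peak) else st
          else st)
        (acc, prev)).1
      = acc ++ (((peaks.zip (prevsOf window_size prev peaks)).filter
          (fun pq => decide (pq.1 - pq.2 > window_size))).map Prod.fst) := by
  induction peaks with
  | nil => intro acc prev _; simp
  | cons p rest ih =>
      intro acc prev hne
      have hlen : acc.length ≠ 0 := by simpa [List.length_eq_zero_iff] using hne
      simp only [List.foldl_cons, prevsOf, List.zip_cons_cons, List.filter_cons]
      rw [if_pos hlen]
      by_cases h : p - prev > window_size
      · rw [if_pos h]
        simp only [h, decide_true, if_pos, List.map_cons]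
        rw [ih (acc ++ [p]) p (by simp)]
        simp [h]
      · rw [if_neg h]
        rw [ih acc prev hne]
        simp [h]

-- ===== VERDICT (by name: the statement is the Claim_ definition above) =====
theorem get_echo_peaks_spec : Claim_equal_get_echo_peaks := by
  intro peaks window_size echo_left_size _
  unfold Spec_get_echo_peaks get_echo_peaks get_echo_peaks_alt
  rw [pvLoop1A_eq_filter_head]
  cases h : peaks.filter (fun p => decide (p > echo_left_size)) with
  | nil => simp [h]
  | cons seed rest =>
      simp only [h, List.head?_cons]
      rw [foldA_eq_zip_filter window_size peaks [seed] seed (by simp),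
          scan_eq_prevsOf window_size peaks [] seed]
      simp
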